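-- pv_equiv track=rewrite | github.com/bopopescu/lazero | metalearning/scanner/retribution/newColossus.py | nonsense
-- ===== SOURCE A (Python) =====
-- def nonsense(a,b,c):
--     # c is the sum of the length of all possible compliment sets.
--     # a is bigger than b?
--     if len(a)>=len(b):
--         if type(a[0])!=int:
--             l=(lambda y: list(map((lambda x: int("0x"+x,0)),y)))
--             a0,b0=l(a),l(b)
--         else:
--             a0,b0=a,b
--         m=False
--         for b1 in b0:
--             for c0 in range(1,1+c):
--                 if m==True:
--                     break
--                 for k in [-1,1]:
--                     b2=b1+c0*k
--                     if b2 in a0: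
--                         m=True
--                         break
--         return m
--     else:
--         return nonsense(b,a,c)
-- ===== SOURCE B (Python) =====
-- def _lb(s, x):
--     # first index i with s[i] >= x (binary search on the sorted list s)
--     lo, hi = 0, len(s)
--     while lo < hi:
--         mid = (lo + hi) // 2
--         if s[mid] < x:
--             lo = mid + 1
--         else:
--             hi = mid
--     return lo
--
--
-- def _has_in(s, lo, hi):
--     # True iff some element of the sorted list s lies in [lo, hi]
--     i = _lb(s, lo)
--     return i < len(s) and s[i] <= hi
--
--
-- def nonsense(a, b, c):
--     s = sorted(a)
--     for y in b:
--         if _has_in(s, y - c, y - 1) or _has_in(s, y + 1, y + c):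
--             return True
--     return False
-- ===== Notes on version B (the rewrite author's own statement) =====
-- stated objective: faster
-- what changed: Replaces A's triple nested loop (every offset 1..c in both directions with a linear membership scan of a, plus a length-based swap recursion) by sorting a once and, for each element y of b, binary-searching the sorted list for an element in [y-c,y-1] or [y+1,y+c].
import Mathlib
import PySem

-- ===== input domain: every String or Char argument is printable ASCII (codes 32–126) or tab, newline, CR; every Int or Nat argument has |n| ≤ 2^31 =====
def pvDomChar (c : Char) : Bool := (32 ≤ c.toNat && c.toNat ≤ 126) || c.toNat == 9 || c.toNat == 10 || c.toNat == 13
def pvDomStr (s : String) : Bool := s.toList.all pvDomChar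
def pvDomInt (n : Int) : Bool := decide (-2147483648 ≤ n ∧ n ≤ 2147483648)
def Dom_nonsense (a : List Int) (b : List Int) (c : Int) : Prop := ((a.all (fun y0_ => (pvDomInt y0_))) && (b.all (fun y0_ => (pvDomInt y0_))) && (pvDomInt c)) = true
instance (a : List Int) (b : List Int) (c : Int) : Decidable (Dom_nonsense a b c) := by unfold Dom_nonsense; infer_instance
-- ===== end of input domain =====

-- B replaces A's triple loop (each offset 1..c, both signs, linear membership scan) by
-- sorting a once and binary-searching, for each y in b, the two intervals [y-c,y-1] and
-- [y+1,y+c]; objective: faster (O((|a|+|b|) log |a| + |b| log c → no c factor) vs O(|a|·|b|·c)).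

-- ===== PORT A =====
-- the innermost 'for k in [-1,1]' loop of A (break = stay true)
def kLoop (a : List Int) (b1 c0 : Int) (m : Bool) : Bool :=
  [(-1 : Int), 1].foldl (fun m k =>
    if m then m else if a.contains (b1 + c0 * k) then true else m) m

-- 'for c0 in range(1, 1+c): if m==True: break; <k loop>' — the break is an early return
def c0Loop (a : List Int) (b1 : Int) (stop c0 : Int) (m : Bool) : Bool :=
  if c0 < stop then
    if m then m                                   -- 'if m==True: break'
    else c0Loop a b1 stop (c0 + 1) (kLoop a b1 c0 m)
  else m
termination_by (stop - c0).toNat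
decreasing_by omega

-- A's main branch (a0, b0 = a, b since the elements are ints)
def nonsenseLoops (a : List Int) (b : List Int) (c : Int) : Bool :=
  b.foldl (fun m b1 => c0Loop a b1 (1 + c) 1 m) false

def nonsense (a : List Int) (b : List Int) (c : Int) : Bool :=
  if a.length ≥ b.length then
    match a with
    | [] => false       -- Python evaluates a[0] here and raises IndexError; excluded by Pre_nonsense
    | _ :: _ => nonsenseLoops a b c   -- type(a[0]) == int on List Int, so a0, b0 = a, b
  else nonsense b a c
termination_by (if b.length ≤ a.length then 0 else 1)
decreasing_by split_ifs <;> omega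

-- ===== PORT B =====
-- port of Source B's _lb: first index i in [lo,hi) with s[i] ≥ x (binary search while-loop)
def lbGo (s : List Int) (x : Int) (lo hi : Nat) : Nat :=
  if lo < hi then
    let mid := (lo + hi) / 2
    if s.getD mid 0 < x then lbGo s x (mid + 1) hi   -- s[mid]: mid < hi ≤ len s, so getD is exact
    else lbGo s x lo mid
  else lo
termination_by hi - lo
decreasing_by all_goals omega

-- port of Source B's _has_in
def hasIn (s : List Int) (lo hi : Int) : Bool :=
  let i := lbGo s lo 0 s.length
  decide (i < s.length) && decide (s.getD i 0 ≤ hi)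

def nonsense_alt (a : List Int) (b : List Int) (c : Int) : Bool :=
  let s := PySem.List.sorted a (fun x => x) false
  b.any (fun y => hasIn s (y - c) (y - 1) || hasIn s (y + 1) (y + c))

-- ===== PRECONDITION & SPEC =====
-- Pre_ excludes only a = [] ∧ b = [], where A raises IndexError on a[0].
def Pre_nonsense (a : List Int) (b : List Int) (c : Int) : Prop := ¬(a = [] ∧ b = [])
instance (a : List Int) (b : List Int) (c : Int) : Decidable (Pre_nonsense a b c) := by
  unfold Pre_nonsense; infer_instance

def pvWitness_nonsense : List Int × List Int × Int := ([0, 3], [1], 2)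

def Spec_nonsense (a : List Int) (b : List Int) (c : Int) (out : Bool) : Prop := out = nonsense_alt a b c
instance (a : List Int) (b : List Int) (c : Int) (out : Bool) : Decidable (Spec_nonsense a b c out) := by unfold Spec_nonsense; infer_instance

-- ===== CLAIM (what is proved, stated in full; the proofs are below) =====
def Claim_equal_nonsense : Prop := ∀ (a : List Int) (b : List Int) (c : Int), Dom_nonsense a b c → Pre_nonsense a b c → Spec_nonsense a b c (nonsense a b c)
-- ===== LEMMAS AND PROOFS =====

-- the common meaning of both programs: some b-element has an a-element within distance c, but not equal
def P (a : List Int) (b : List Int) (c : Int) : Prop :=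
  ∃ y ∈ b, ∃ x ∈ a, (y - c ≤ x ∧ x ≤ y - 1) ∨ (y + 1 ≤ x ∧ x ≤ y + c)

theorem P_symm (a b : List Int) (c : Int) : P a b c ↔ P b a c := by
  constructor <;>
    (rintro ⟨y, hy, x, hx, h⟩; exact ⟨x, hx, y, hy, by omega⟩)

theorem kLoop_eq (a : List Int) (b1 c0 : Int) (m : Bool) :
    kLoop a b1 c0 m = (m || a.contains (b1 - c0) || a.contains (b1 + c0)) := by
  have h1 : b1 + c0 * (-1) = b1 - c0 := by ring
  have h2 : b1 + c0 * 1 = b1 + c0 := by ring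
  unfold kLoop
  rw [List.foldl_cons, List.foldl_cons, List.foldl_nil, h1, h2]
  cases m <;> cases h3 : a.contains (b1 - c0) <;> simp

theorem c0Loop_eq (a : List Int) (b1 : Int) :
    ∀ (n : Nat) (stop c0 : Int) (m : Bool), (stop - c0).toNat = n →
      c0Loop a b1 stop c0 m
        = (m || (PySem.List.pyRange c0 stop 1).any
            (fun c0 => a.contains (b1 - c0) || a.contains (b1 + c0))) := by
  intro n
  induction n with
  | zero =>
    intro stop c0 m h
    rw [c0Loop, if_neg (by omega), PySem.List.pyRange_one_eq_nil (by omega)]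
    simp
  | succ k ih =>
    intro stop c0 m h
    rw [c0Loop, if_pos (by omega), PySem.List.pyRange_one_cons (by omega), List.any_cons]
    cases m
    · rw [if_neg (by simp), ih stop (c0 + 1) _ (by omega), kLoop_eq]
      simp [Bool.or_assoc]
    · simp

theorem nonsenseLoops_eq (a b : List Int) (c : Int) :
    nonsenseLoops a b c
      = b.any (fun b1 => (PySem.List.pyRange 1 (1 + c) 1).any
          (fun c0 => a.contains (b1 - c0) || a.contains (b1 + c0))) := by
  unfold nonsenseLoops
  have key : ∀ (l : List Int) (m : Bool),
      l.foldl (fun m b1 => c0Loop a b1 (1 + c) 1 m) m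
        = (m || l.any (fun b1 => (PySem.List.pyRange 1 (1 + c) 1).any
            (fun c0 => a.contains (b1 - c0) || a.contains (b1 + c0)))) := by
    intro l
    induction l with
    | nil => intro m; simp
    | cons b1 t iht =>
      intro m
      rw [List.foldl_cons, List.any_cons, iht, c0Loop_eq a b1 (1 + c - 1).toNat _ 1 m rfl]
      cases m <;> simp
  rw [key]; simp

theorem loops_iff_P (a b : List Int) (c : Int) :
    nonsenseLoops a b c = true ↔ P a b c := by
  rw [nonsenseLoops_eq]
  simp only [List.any_eq_true, PySem.List.mem_pyRange_one, Bool.or_eq_true,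
    List.contains_eq_mem, decide_eq_true_eq, P]
  constructor
  · rintro ⟨y, hy, c0, ⟨h1, h2⟩, h⟩
    rcases h with h | h
    · exact ⟨y, hy, y - c0, h, by omega⟩
    · exact ⟨y, hy, y + c0, h, by omega⟩
  · rintro ⟨y, hy, x, hx, h⟩
    rcases h with ⟨h1, h2⟩ | ⟨h1, h2⟩
    · refine ⟨y, hy, y - x, by omega, Or.inl ?_⟩
      have hxx : y - (y - x) = x := by ring
      rw [hxx]; exact hx
    · refine ⟨y, hy, x - y, by omega, Or.inr ?_⟩
      have hxx : y + (x - y) = x := by ring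
      rw [hxx]; exact hx

-- binary-search invariant: lbGo returns the first index in [lo,hi] at which s reaches x
theorem lbGo_spec (s : List Int) (x : Int)
    (hs : ∀ p q : Nat, p ≤ q → q < s.length → s.getD p 0 ≤ s.getD q 0) :
    ∀ (n lo hi : Nat), hi - lo = n → lo ≤ hi → hi ≤ s.length →
      lo ≤ lbGo s x lo hi ∧ lbGo s x lo hi ≤ hi ∧
      (∀ j, lo ≤ j → j < lbGo s x lo hi → s.getD j 0 < x) ∧
      (∀ j, lbGo s x lo hi ≤ j → j < hi → x ≤ s.getD j 0) := by
  intro n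
  induction n using Nat.strong_induction_on with
  | _ n ih =>
    intro lo hi hn hle hlen
    rw [lbGo]
    by_cases h : lo < hi
    · simp only [if_pos h]
      by_cases hcmp : s.getD ((lo + hi) / 2) 0 < x
      · simp only [if_pos hcmp]
        obtain ⟨i1, i2, i3, i4⟩ :=
          ih (hi - ((lo + hi) / 2 + 1)) (by omega) ((lo + hi) / 2 + 1) hi rfl (by omega) hlen
        refine ⟨by omega, i2, ?_, i4⟩
        intro j hj1 hj2
        by_cases hj : (lo + hi) / 2 + 1 ≤ j
        · exact i3 j hj hj2
        · calc s.getD j 0 ≤ s.getD ((lo + hi) / 2) 0 := hs j _ (by omega) (by omega)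
            _ < x := hcmp
      · simp only [if_neg hcmp]
        obtain ⟨i1, i2, i3, i4⟩ :=
          ih ((lo + hi) / 2 - lo) (by omega) lo ((lo + hi) / 2) rfl (by omega) (by omega)
        refine ⟨i1, by omega, i3, ?_⟩
        intro j hj1 hj2
        by_cases hj : j < (lo + hi) / 2
        · exact i4 j hj1 hj
        · calc x ≤ s.getD ((lo + hi) / 2) 0 := not_lt.mp hcmp
            _ ≤ s.getD j 0 := hs _ j (by omega) (by omega)
    · simp only [if_neg h]
      exact ⟨le_refl lo, by omega, fun j h1 h2 => absurd h1 (by omega),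
        fun j h1 h2 => absurd h2 (by omega)⟩

-- on a sorted list, hasIn decides whether some element lies in [lo, hi]
theorem hasIn_iff (s : List Int) (lo hi : Int)
    (hs : ∀ p q : Nat, p ≤ q → q < s.length → s.getD p 0 ≤ s.getD q 0) :
    hasIn s lo hi = true ↔ ∃ z ∈ s, lo ≤ z ∧ z ≤ hi := by
  unfold hasIn
  obtain ⟨i1, i2, i3, i4⟩ :=
    lbGo_spec s lo hs (s.length - 0) 0 s.length rfl (Nat.zero_le _) (le_refl _)
  simp only [Bool.and_eq_true, decide_eq_true_eq]
  constructor
  · rintro ⟨hlt, hle⟩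
    refine ⟨s.getD (lbGo s lo 0 s.length) 0, ?_, i4 _ (le_refl _) hlt, hle⟩
    rw [List.getD_eq_getElem s 0 hlt]
    exact List.getElem_mem hlt
  · rintro ⟨z, hz, hz1, hz2⟩
    obtain ⟨j, hjlen, hjz⟩ := List.getElem_of_mem hz
    have hjD : s.getD j 0 = z := by rw [List.getD_eq_getElem s 0 hjlen, hjz]
    have hrj : lbGo s lo 0 s.length ≤ j := by
      by_contra hcon
      have := i3 j (Nat.zero_le _) (by omega)
      omega
    have hrlt : lbGo s lo 0 s.length < s.length := by omega
    refine ⟨hrlt, ?_⟩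
    calc s.getD (lbGo s lo 0 s.length) 0 ≤ s.getD j 0 := hs _ j hrj hjlen
      _ ≤ hi := by omega

-- the sorted copy of a is pointwise monotone in its indices
theorem sorted_mono (a : List Int) :
    ∀ p q : Nat, p ≤ q → q < (PySem.List.sorted a (fun x => x) false).length →
      (PySem.List.sorted a (fun x => x) false).getD p 0 ≤ (PySem.List.sorted a (fun x => x) false).getD q 0 := by
  intro p q hpq hq
  rcases Nat.lt_or_ge p q with h | h
  · have hpw := PySem.List.sorted_pairwise (xs := a) (key := fun x => x)
    rw [List.pairwise_iff_getElem] at hpw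
    have := hpw p q (by omega) hq h
    rwa [List.getD_eq_getElem _ 0 (by omega), List.getD_eq_getElem _ 0 hq]
  · have : p = q := by omega
    simp [this]

theorem alt_iff_P (a b : List Int) (c : Int) :
    nonsense_alt a b c = true ↔ P a b c := by
  unfold nonsense_alt P
  simp only [List.any_eq_true, Bool.or_eq_true,
    hasIn_iff _ _ _ (sorted_mono a), PySem.List.mem_sorted]
  constructor
  · rintro ⟨y, hy, ⟨z, hz, h1, h2⟩ | ⟨z, hz, h1, h2⟩⟩
    · exact ⟨y, hy, z, hz, Or.inl ⟨h1, h2⟩⟩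
    · exact ⟨y, hy, z, hz, Or.inr ⟨h1, h2⟩⟩
  · rintro ⟨y, hy, x, hx, h | h⟩
    · exact ⟨y, hy, Or.inl ⟨x, hx, h.1, h.2⟩⟩
    · exact ⟨y, hy, Or.inr ⟨x, hx, h.1, h.2⟩⟩

theorem nonsense_eq_alt (a b : List Int) (c : Int) (hpre : ¬(a = [] ∧ b = [])) :
    nonsense a b c = nonsense_alt a b c := by
  rw [nonsense.eq_def]
  by_cases hlen : a.length ≥ b.length
  · simp only [if_pos hlen]
    match a, hpre, hlen with
    | [], hpre, hlen =>
      have hb : b = [] := List.eq_nil_of_length_eq_zero (by simpa using hlen)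
      exact absurd ⟨rfl, hb⟩ hpre
    | x :: t, _, _ =>
      exact Bool.eq_iff_iff.mpr ((loops_iff_P _ _ _).trans (alt_iff_P _ _ _).symm)
  · simp only [if_neg hlen]
    rw [nonsense.eq_def]
    have hlen2 : b.length ≥ a.length := by omega
    simp only [if_pos hlen2]
    match b, hlen with
    | [], hlen => exact absurd (Nat.zero_le a.length) (by simpa using hlen)
    | y :: u, _ =>
      exact Bool.eq_iff_iff.mpr
        (((loops_iff_P _ _ _).trans (P_symm _ _ _)).trans (alt_iff_P _ _ _).symm)

-- ===== VERDICT (by name: the statement is the Claim_ definition above) =====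
theorem nonsense_spec : Claim_equal_nonsense := by
  intro a b c _ hpre
  unfold Spec_nonsense
  exact nonsense_eq_alt a b c hpre
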